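-- pv_equiv track=rewrite | github.com/ChuckVanHoff/forecast-forecast | ETL/instant.py | cast_count_all
-- ===== SOURCE A (Python) =====
-- def cast_count_all(instants):
--     ''' get a tally for the forecast counts per document
--
--     :param instants: docmuments loaded from the db.instants collection
--     Instant class objects
--     :type instants: list
--     '''
--
--     n = 0
--     collection_cast_counts = {}
--
--     # Go through each doc in the collection and count the number of items in
--     # the forecasts array. Add to the tally for that count.
--     for doc in instants:
--         n = len(doc['forecasts'])
--         if n in collection_cast_counts:
--             collection_cast_counts[n] += 1
--         else:
--             collection_cast_counts[n] = 1
--     return collection_cast_counts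
-- ===== SOURCE B (Python) =====
-- def cast_count_all(instants):
--     ''' get a tally for the forecast counts per document '''
--     # Recursive partition tally: take the first length, partition the list
--     # into occurrences of it and everything else, record the partition size,
--     # and recurse on the remainder.  No dict lookups/increments at all.
--     def tally(lengths):
--         if not lengths:
--             return {}
--         h = lengths[0]
--         same = [x for x in lengths if x == h]
--         rest = [x for x in lengths if x != h]
--         out = {h: len(same)}
--         out.update(tally(rest))
--         return out
--     return tally([len(doc['forecasts']) for doc in instants])
-- ===== Notes on version B (the rewrite author's own statement) =====
-- stated objective: alternative
-- what changed: Replaces the one-pass incremental dict-bumping scan with a recursive partition tally: extract the length list, then repeatedly split it on its first element, emit that partition's size, and recurse on the remainder; no dictionary counting at all.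
import Mathlib
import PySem

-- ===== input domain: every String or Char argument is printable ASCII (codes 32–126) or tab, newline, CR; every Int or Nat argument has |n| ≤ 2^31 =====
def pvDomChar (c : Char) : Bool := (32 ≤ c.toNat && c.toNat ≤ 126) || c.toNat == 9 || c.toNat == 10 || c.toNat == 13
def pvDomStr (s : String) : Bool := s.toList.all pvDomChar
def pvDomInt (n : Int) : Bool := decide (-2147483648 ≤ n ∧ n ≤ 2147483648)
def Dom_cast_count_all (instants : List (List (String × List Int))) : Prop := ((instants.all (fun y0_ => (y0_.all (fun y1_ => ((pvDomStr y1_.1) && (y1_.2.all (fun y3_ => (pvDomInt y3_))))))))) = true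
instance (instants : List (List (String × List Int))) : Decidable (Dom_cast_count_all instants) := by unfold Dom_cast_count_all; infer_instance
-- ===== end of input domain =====

-- B replaces A's one-pass incremental dict-bumping by a recursive partition tally (split the length
-- list on its first element, emit that partition's size, recurse on the rest); objective: alternative.

-- doc['forecasts'] : first value for the key, [] when absent (Python raises KeyError there; Pre_ excludes it)
def pvForecasts (doc : List (String × List Int)) : List Int :=
  ((PySem.Dict.mk doc).get? "forecasts").getD []

-- ===== PORT A =====
def cast_count_all (instants : List (List (String × List Int))) : List (Int × Int) :=
  let d := instants.foldl (fun (d : PySem.Dict Int Int) doc =>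
    let n : Int := (pvForecasts doc).length
    if d.contains n then d.modify n 0 (· + 1) else d.insert n 1) PySem.Dict.empty
  d.items

-- ===== PORT B =====
-- Source B's helper 'tally': partition on the first element, recurse on the rest
def pvTally (lengths : List Int) : List (Int × Int) :=
  match lengths with
  | [] => []
  | h :: t =>
    let same := (h :: t).filter (fun x => x == h)
    let rest := (h :: t).filter (fun x => x != h)
    (h, (same.length : Int)) :: pvTally rest
termination_by lengths.length
decreasing_by
  simp only [List.filter_cons, bne_self_eq_false, List.length_cons]
  exact Nat.lt_succ_of_le (List.length_filter_le _ _)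

def cast_count_all_alt (instants : List (List (String × List Int))) : List (Int × Int) :=
  pvTally (instants.map (fun doc => ((pvForecasts doc).length : Int)))

-- ===== PRECONDITION & SPEC =====
-- Pre_ excludes exactly the inputs where some doc lacks the 'forecasts' key: there A raises KeyError (B too).
def Pre_cast_count_all (instants : List (List (String × List Int))) : Prop :=
  ∀ doc ∈ instants, "forecasts" ∈ doc.map (·.1)
instance (instants : List (List (String × List Int))) : Decidable (Pre_cast_count_all instants) := by unfold Pre_cast_count_all; infer_instance

def pvWitness_cast_count_all : (List (List (String × List Int))) := [[("forecasts", [1, 2])], [("forecasts", [])]]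

def Spec_cast_count_all (instants : List (List (String × List Int))) (out : List (Int × Int)) : Prop := out = cast_count_all_alt instants
instance (instants : List (List (String × List Int))) (out : List (Int × Int)) : Decidable (Spec_cast_count_all instants out) := by unfold Spec_cast_count_all; infer_instance

-- ===== CLAIM =====
def Claim_equal_cast_count_all : Prop := ∀ (instants : List (List (String × List Int))), Dom_cast_count_all instants → Pre_cast_count_all instants → Spec_cast_count_all instants (cast_count_all instants)

-- ===== LEMMAS AND PROOFS =====

-- A's loop step (branch on membership) is exactly the Counter step.
lemma step_eq_counter_step (d : PySem.Dict Int Int) (n : Int) :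
    (if d.contains n then d.modify n 0 (· + 1) else d.insert n 1) = d.modify n 0 (· + 1) := by
  split_ifs with h
  · rfl
  · apply PySem.Dict.ext
    simp [PySem.Dict.modify, PySem.Dict.insert, h]
    rw [PySem.Dict.getD_of_not_contains]
    simpa using h

-- set(h::t) starts with h, then the later distinct elements other than h
lemma ofList_cons (h : Int) (t : List Int) :
    PySem.Set.ofList (h :: t) = h :: (PySem.Set.ofList t).filter (fun y => y != h) := by
  have : PySem.Set.ofList (h :: t) = PySem.Set.update [h] t := by
    rw [PySem.Set.ofList_eq_foldl]
    simp [PySem.Set.update, PySem.Set.add, PySem.Set.contains]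
  rw [this, PySem.Set.update_eq_append_filter]
  simp only [PySem.Set.contains, List.cons_append, List.nil_append]
  congr 1
  apply List.filter_congr
  intro y _
  by_cases hy : y = h <;> simp [hy, bne]

-- building the set commutes with filtering
lemma ofList_filter (p : Int → Bool) (t : List Int) :
    (PySem.Set.ofList t).filter p = PySem.Set.ofList (t.filter p) := by
  induction t with
  | nil => simp [PySem.Set.ofList, PySem.Set.empty]
  | cons h t IH =>
    rw [ofList_cons, List.filter_cons]
    by_cases hp : p h
    · rw [if_pos hp, List.filter_cons_of_pos hp, ofList_cons, ← IH]
      rw [List.filter_filter, List.filter_filter]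
      congr 1
      apply List.filter_congr
      intro y _
      simp [Bool.and_comm]
    · rw [if_neg hp, List.filter_cons_of_neg (by simpa using hp), ← IH]
      rw [List.filter_filter]
      apply List.filter_congr
      intro y _
      by_cases hy : y = h
      · subst hy; simp [hp]
      · simp [hy]

-- B's recursion computes Counter(lengths).items()
lemma pvTally_eq (l : List Int) :
    pvTally l = (PySem.Set.ofList l).map (fun n => (n, (l.count n : Int))) := by
  induction l using pvTally.induct with
  | case1 => simp [pvTally, PySem.Set.ofList, PySem.Set.empty]
  | case2 h t rest IH =>
    rw [pvTally]
    rw [IH]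
    rw [ofList_cons, List.map_cons]
    have hrest : (h :: t).filter (fun x => x != h) = t.filter (fun x => x != h) := by
      simp
    congr 1
    · congr 1
      simp [List.count_eq_countP, List.countP_eq_length_filter]
    · rw [ofList_filter, ← hrest]
      apply List.map_congr_left
      intro n hn
      have hn' : n ∈ (h :: t).filter (fun x => x != h) := (PySem.Set.mem_ofList _ _).mp hn
      have hne : n ≠ h := by
        have := List.of_mem_filter hn'
        simpa using this
      have hsame : rest = List.filter (fun x => x != h) t := hrest
      congr 1
      rw [hsame, List.count_filter (by simpa using hne), List.count_cons_of_ne (fun e => hne e.symm)]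

-- ===== VERDICT =====
theorem cast_count_all_spec : Claim_equal_cast_count_all := by
  intro instants _ _
  show cast_count_all instants = cast_count_all_alt instants
  unfold cast_count_all cast_count_all_alt
  simp only [step_eq_counter_step]
  rw [show (instants.foldl (fun (d : PySem.Dict Int Int) doc =>
        d.modify ((pvForecasts doc).length : Int) 0 (· + 1)) PySem.Dict.empty)
      = PySem.Dict.counter (instants.map (fun doc => ((pvForecasts doc).length : Int))) by
    rw [PySem.Dict.counter_eq_foldl, List.foldl_map]]
  rw [PySem.Dict.items_counter, pvTally_eq]
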